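-- pv_equiv track=rewrite | github.com/Fionn88/ccClub-Practice | judge/8-2.py | longest_str
-- ===== SOURCE A (Python) =====
-- def longest_str(l):
--     MaxValue = 0
--     ans = ""
--     for i in range(len(l)-1,-1,-1):
--       if len(l[i]) > MaxValue:
--         MaxValue = len(l[i])
--       if MaxValue == len(l[i]):
--         ans = l[i]
--
--     return(ans)
-- ===== SOURCE B (Python) =====
-- def longest_str(l):
--     # Two-phase: compute the max length, then return the first string of that length.
--     if not l:
--         return ""
--     m = max(len(s) for s in l)
--     return next(s for s in l if len(s) == m)
-- ===== Notes on version B (the rewrite author's own statement) =====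
-- stated objective: simpler
-- what changed: Replaces A's backward index loop with running max/answer state by two plain forward passes: compute the maximum length, then take the first string of that length.
import Mathlib
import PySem

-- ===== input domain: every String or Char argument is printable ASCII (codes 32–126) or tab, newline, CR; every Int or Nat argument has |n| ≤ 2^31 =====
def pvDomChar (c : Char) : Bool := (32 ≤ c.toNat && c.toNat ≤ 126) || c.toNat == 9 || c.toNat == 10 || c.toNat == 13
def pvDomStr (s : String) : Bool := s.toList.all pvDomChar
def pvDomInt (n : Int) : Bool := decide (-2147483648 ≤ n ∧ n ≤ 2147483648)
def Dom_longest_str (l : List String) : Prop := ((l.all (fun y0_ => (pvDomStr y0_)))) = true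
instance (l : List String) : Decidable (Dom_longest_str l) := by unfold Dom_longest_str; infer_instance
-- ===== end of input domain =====

-- B replaces A's backward index loop (running max + overwrite) by two forward passes:
-- max length first, then the first string of that length; objective: simpler.

-- ===== PORT A =====
-- backward index loop; l[i] is always in range here, so pyGetD with default "" is exact
def longest_str (l : List String) : String :=
  ((PySem.List.pyRange (PySem.List.len l - 1) (-1) (-1)).foldl
    (fun (acc : Int × String) i =>
      let s := PySem.List.pyGetD l i ""
      let mv := if PySem.Str.len s > acc.1 then PySem.Str.len s else acc.1
      (mv, if mv = PySem.Str.len s then s else acc.2))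
    (0, "")).2

-- ===== PORT B =====
-- max(len(s) for s in l) = running-max loop (PySem.List.max? on the lengths);
-- next(s for s in l if len(s)==m) = first match (find?); it always succeeds, getD "" is unreached
def longest_str_alt (l : List String) : String :=
  match PySem.List.max? (l.map (fun s => PySem.Str.len s)) (fun x => x) with
  | none => ""
  | some m => (l.find? (fun s => PySem.Str.len s == m)).getD ""

-- ===== PRECONDITION & SPEC =====
def Spec_longest_str (l : List String) (out : String) : Prop := out = longest_str_alt l
instance (l : List String) (out : String) : Decidable (Spec_longest_str l out) := by unfold Spec_longest_str; infer_instance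

-- ===== CLAIM (what is proved, stated in full; the proofs are below) =====
def Claim_equal_longest_str : Prop := ∀ (l : List String), Dom_longest_str l → Spec_longest_str l (longest_str l)

-- ===== LEMMAS AND PROOFS =====

-- A's loop body as a foldr step (after reversing the countdown range)
def pvStep (acc : Int × String) (s : String) : Int × String :=
  let mv := if PySem.Str.len s > acc.1 then PySem.Str.len s else acc.1
  (mv, if mv = PySem.Str.len s then s else acc.2)

-- running max of the lengths of l (0 for [])
def pvMaxLen (l : List String) : Int := (l.map (fun s => PySem.Str.len s)).foldl max 0

lemma pvFoldlMax (xs : List Int) (x y : Int) :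
    xs.foldl max (max x y) = max x (xs.foldl max y) := by
  induction xs generalizing y with
  | nil => rfl
  | cons a t ih => simp only [List.foldl_cons, max_assoc, ih]

lemma pvLenNonneg (s : String) : 0 ≤ PySem.Str.len s := by
  simp [PySem.Str.len_eq]

lemma pvMaxLen_cons (s : String) (t : List String) :
    pvMaxLen (s :: t) = max (PySem.Str.len s) (pvMaxLen t) := by
  simp only [pvMaxLen, List.map_cons, List.foldl_cons]
  rw [max_comm (0 : Int)]
  exact pvFoldlMax _ _ _

lemma pvMax?_lens (s : String) (t : List String) :
    PySem.List.max? ((s :: t).map (fun s => PySem.Str.len s)) (fun x => x)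
      = some (pvMaxLen (s :: t)) := by
  rw [List.map_cons, PySem.List.max?_id_cons, pvMaxLen_cons]
  congr 1
  have h0 : max (PySem.Str.len s) (0 : Int) = PySem.Str.len s :=
    max_eq_left (pvLenNonneg s)
  calc (t.map (fun s => PySem.Str.len s)).foldl max (PySem.Str.len s)
      = (t.map (fun s => PySem.Str.len s)).foldl max (max (PySem.Str.len s) 0) := by rw [h0]
    _ = max (PySem.Str.len s) (pvMaxLen t) := pvFoldlMax _ _ _

-- B's recurrence: leftmost longest
lemma pvAlt_cons (s : String) (t : List String) :
    longest_str_alt (s :: t) =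
      if pvMaxLen t ≤ PySem.Str.len s then s else longest_str_alt t := by
  rw [longest_str_alt, pvMax?_lens, pvMaxLen_cons]
  by_cases h : pvMaxLen t ≤ PySem.Str.len s
  · rw [if_pos h, max_eq_left h]
    simp
  · rw [if_neg h]
    rw [max_eq_right (le_of_lt (not_le.mp h))]
    have hne : (PySem.Str.len s == pvMaxLen t) = false := by
      simp only [beq_eq_false_iff_ne, ne_eq]
      simp only [PySem.Str.len_eq] at h ⊢
      omega
    simp only [List.find?_cons, hne]
    -- t ≠ [] since pvMaxLen t > len s ≥ 0
    cases t with
    | nil =>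
      exfalso
      have := pvLenNonneg s
      simp only [pvMaxLen, List.map_nil, List.foldl_nil] at h
      have := pvLenNonneg s
      omega
    | cons u v =>
      rw [longest_str_alt, pvMax?_lens]

-- A's fold carries (pvMaxLen, longest_str_alt) as its invariant
lemma pvFoldr_inv (l : List String) :
    l.foldr (fun s acc => pvStep acc s) ((0 : Int), "") =
      (pvMaxLen l, longest_str_alt l) := by
  induction l with
  | nil => rfl
  | cons s t ih =>
    rw [List.foldr_cons, ih, pvAlt_cons, pvMaxLen_cons]
    unfold pvStep
    simp only [Prod.mk.injEq, PySem.Str.len_eq]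
    constructor
    · split_ifs <;> omega
    · split_ifs <;> first | rfl | omega

-- A's countdown loop = foldr of pvStep over l
lemma pvA_eq_foldr (l : List String) :
    longest_str l = (l.foldr (fun s acc => pvStep acc s) ((0 : Int), "")).2 := by
  have h1 : longest_str l
      = (((PySem.List.pyRange 0 (PySem.List.len l) 1).reverse).foldl
          (fun acc i => pvStep acc (PySem.List.pyGetD l i "")) ((0 : Int), "")).2 := by
    unfold longest_str pvStep
    rw [show PySem.List.pyRange (PySem.List.len l - 1) (-1) (-1)
          = (PySem.List.pyRange 0 (PySem.List.len l) 1).reverse by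
        rw [PySem.List.pyRange_neg_one_eq_reverse]; norm_num]
  rw [h1, ← List.foldl_map, List.map_reverse,
      PySem.List.map_pyGetD_pyRange_zero, List.foldl_reverse]

-- ===== VERDICT (by name: the statement is the Claim_ definition above) =====
theorem longest_str_spec : Claim_equal_longest_str := by
  intro l _
  unfold Spec_longest_str
  rw [pvA_eq_foldr, pvFoldr_inv]
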